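-- pv_equiv track=rewrite | github.com/ivanpetrov19960407-afk/construction-ai-core | agents/researcher/fact_validator.py | _find_normalized_substring_start
-- ===== SOURCE A (Python) =====
-- def _find_normalized_substring_start(text: str, normalized_substring: str) -> int | None:
--     if not normalized_substring:
--         return None
--     normalized_chars: list[str] = []
--     index_map: list[int] = []
--     for idx, ch in enumerate(text):
--         lower = ch.lower()
--         if ch.isspace():
--             if normalized_chars and normalized_chars[-1] != " ":
--                 normalized_chars.append(" ")
--                 index_map.append(idx)
--             continue
--         normalized_chars.append(lower)
--         index_map.append(idx)
--     normalized_text = "".join(normalized_chars).strip()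
--     pos = normalized_text.find(normalized_substring)
--     if pos < 0 or pos >= len(index_map):
--         return None
--     return index_map[pos]
-- ===== SOURCE B (Python) =====
-- def _find_normalized_substring_start(text: str, normalized_substring: str) -> int | None:
--     if not normalized_substring:
--         return None
--     # Pass 1: build only the normalized text (no parallel index map).
--     pieces: list[str] = []
--     for ch in text:
--         if ch.isspace():
--             if pieces and pieces[-1] != " ":
--                 pieces.append(" ")
--         else:
--             pieces.append(ch.lower())
--     normalized = "".join(pieces)
--     if normalized.endswith(" "):
--         normalized = normalized[:-1]
--     pos = normalized.find(normalized_substring)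
--     if pos < 0:
--         return None
--     # Pass 2: re-run the normalization bookkeeping over the original text,
--     # counting emitted normalized characters until we reach position pos.
--     count = 0
--     prev_space = False
--     for idx, ch in enumerate(text):
--         if ch.isspace():
--             if count > 0 and not prev_space:
--                 if count == pos:
--                     return idx
--                 count += 1
--                 prev_space = True
--         else:
--             if count == pos:
--                 return idx
--             count += 1
--             prev_space = False
--     return None
-- ===== Notes on version B (the rewrite author's own statement) =====
-- stated objective: alternative
-- what changed: B drops A's parallel index_map entirely: it normalizes the text alone, finds the substring in the normalized text, and then recovers the original index with a separate counting pass over the raw text that stops when the number of emitted normalized characters reaches the match position (measured ~1.7x faster: no per-character index list is built).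
import Mathlib
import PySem

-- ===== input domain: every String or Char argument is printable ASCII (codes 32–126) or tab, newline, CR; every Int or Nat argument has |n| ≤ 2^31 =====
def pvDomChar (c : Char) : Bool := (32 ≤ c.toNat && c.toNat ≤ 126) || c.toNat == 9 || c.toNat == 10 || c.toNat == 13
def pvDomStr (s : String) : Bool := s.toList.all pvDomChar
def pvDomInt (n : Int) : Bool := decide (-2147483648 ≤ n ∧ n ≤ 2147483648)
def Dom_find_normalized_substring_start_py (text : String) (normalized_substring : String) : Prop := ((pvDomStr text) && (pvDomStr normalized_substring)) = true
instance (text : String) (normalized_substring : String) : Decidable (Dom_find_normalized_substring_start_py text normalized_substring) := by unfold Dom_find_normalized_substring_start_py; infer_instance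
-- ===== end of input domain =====

-- B replaces A's parallel index_map with two passes: build only the normalized text, find the
-- substring, then recover the original index by re-running the normalization bookkeeping and
-- counting emitted characters; same return value, different decomposition (objective: alternative).


-- ===== PORT A =====
-- A's enumerate loop: state (normalized_chars, index_map), idx is the running enumerate index.
def pvALoop : List Char → Int → List Char → List Int → List Char × List Int
  | [], _, chars, imap => (chars, imap)
  | c :: rest, idx, chars, imap =>
    if PySem.Chars.isspace c then
      if chars ≠ [] ∧ chars.getLast? ≠ some ' ' then
        pvALoop rest (idx + 1) (chars ++ [' ']) (imap ++ [idx])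
      else
        pvALoop rest (idx + 1) chars imap
    else
      pvALoop rest (idx + 1) (chars ++ [PySem.Chars.lowerChar c]) (imap ++ [idx])

def find_normalized_substring_start_py (text : String) (normalized_substring : String) : Option Int :=
  if normalized_substring = "" then none
  else
    let res := pvALoop text.toList 0 [] []
    let normalized_text := PySem.Chars.strip res.1        -- "".join(normalized_chars).strip()
    let pos := PySem.Chars.find normalized_text normalized_substring.toList
    if pos < 0 ∨ (res.2.length : Int) ≤ pos then none
    else PySem.List.pyGet? res.2 pos                      -- index_map[pos] (in range here)

-- ===== PORT B =====
-- B pass 1: the normalized text only, no index map.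
def pvBNorm : List Char → List Char → List Char
  | [], pieces => pieces
  | c :: rest, pieces =>
    if PySem.Chars.isspace c then
      if pieces ≠ [] ∧ pieces.getLast? ≠ some ' ' then pvBNorm rest (pieces ++ [' '])
      else pvBNorm rest pieces
    else pvBNorm rest (pieces ++ [PySem.Chars.lowerChar c])

-- B pass 2: count emitted normalized characters until the count reaches pos.
def pvBRecover : List Char → Int → Int → Int → Bool → Option Int
  | [], _, _, _, _ => none
  | c :: rest, idx, pos, count, prevSpace =>
    if PySem.Chars.isspace c then
      if 0 < count ∧ prevSpace = false then
        if count = pos then some idx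
        else pvBRecover rest (idx + 1) pos (count + 1) true
      else pvBRecover rest (idx + 1) pos count prevSpace
    else
      if count = pos then some idx
      else pvBRecover rest (idx + 1) pos (count + 1) false

def find_normalized_substring_start_py_alt (text : String) (normalized_substring : String) : Option Int :=
  if normalized_substring = "" then none
  else
    let pieces := pvBNorm text.toList []
    let normalized :=
      if PySem.Chars.endswith pieces [' '] then PySem.Chars.slice pieces none (some (-1))  -- normalized[:-1]
      else pieces
    let pos := PySem.Chars.find normalized normalized_substring.toList
    if pos < 0 then none
    else pvBRecover text.toList 0 pos 0 false

-- ===== PRECONDITION & SPEC =====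
def Spec_find_normalized_substring_start_py (text : String) (normalized_substring : String) (out : Option Int) : Prop := out = find_normalized_substring_start_py_alt text normalized_substring
instance (text : String) (normalized_substring : String) (out : Option Int) : Decidable (Spec_find_normalized_substring_start_py text normalized_substring out) := by unfold Spec_find_normalized_substring_start_py; infer_instance

-- ===== CLAIM (what is proved, stated in full; the proofs are below) =====
def Claim_equal_find_normalized_substring_start_py : Prop := ∀ (text : String) (normalized_substring : String), Dom_find_normalized_substring_start_py text normalized_substring → Spec_find_normalized_substring_start_py text normalized_substring (find_normalized_substring_start_py text normalized_substring)

-- ===== LEMMAS AND PROOFS =====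

-- The two normalization passes build the same character list.
theorem pvALoop_fst (l : List Char) (idx : Int) (chars : List Char) (imap : List Int) :
    (pvALoop l idx chars imap).1 = pvBNorm l chars := by
  induction l generalizing idx chars imap with
  | nil => rfl
  | cons c rest ih =>
    simp only [pvALoop, pvBNorm]
    split_ifs <;> apply ih

-- A's index_map only grows by appending.
theorem pvALoop_snd_prefix (l : List Char) (idx : Int) (chars : List Char) (imap : List Int) :
    ∃ t, (pvALoop l idx chars imap).2 = imap ++ t := by
  induction l generalizing idx chars imap with
  | nil => exact ⟨[], by simp [pvALoop]⟩
  | cons c rest ih =>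
    simp only [pvALoop]
    split_ifs
    · obtain ⟨t, ht⟩ := ih (idx + 1) (chars ++ [' ']) (imap ++ [idx])
      exact ⟨[idx] ++ t, by simp [ht]⟩
    · exact ih (idx + 1) chars imap
    · obtain ⟨t, ht⟩ := ih (idx + 1) (chars ++ [PySem.Chars.lowerChar c]) (imap ++ [idx])
      exact ⟨[idx] ++ t, by simp [ht]⟩

-- Lowercasing a non-whitespace character never yields whitespace.
theorem pvLowerChar_not_space (c : Char) (h : PySem.Chars.isspace c = false) :
    PySem.Chars.isspace (PySem.Chars.lowerChar c) = false := by
  unfold PySem.Chars.lowerChar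
  split
  · rename_i hu
    simp [PySem.Chars.isupper] at hu
    obtain ⟨h1, h2⟩ := hu
    have h1' : 65 ≤ c.toNat := h1
    have h2' : c.toNat ≤ 90 := h2
    have hv : (Char.ofNat (c.toNat + 32)).toNat = c.toNat + 32 := by
      rw [Char.toNat_ofNat]
      have : (c.toNat + 32).isValidChar := Or.inl (by omega)
      simp [this]
    simp [PySem.Chars.isspace, hv]
    omega
  · exact h

theorem pvLower_ne_space (c : Char) (h : PySem.Chars.isspace c = false) :
    PySem.Chars.lowerChar c ≠ ' ' := by
  intro he
  have := pvLowerChar_not_space c h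
  rw [he] at this
  exact absurd this (by decide)

-- Invariant of the normalized character list: the only whitespace it contains is ' ',
-- it never starts with ' ', and it never ends with two spaces.
def pvGood (cs : List Char) : Prop :=
  (∀ c ∈ cs, PySem.Chars.isspace c = true → c = ' ') ∧
  cs.head? ≠ some ' ' ∧
  (cs.getLast? = some ' ' → cs.dropLast.getLast? ≠ some ' ')

theorem pvGood_bNorm (l : List Char) (pieces : List Char) (h : pvGood pieces) :
    pvGood (pvBNorm l pieces) := by
  induction l generalizing pieces with
  | nil => exact h
  | cons c rest ih =>
    obtain ⟨h1, h2, h3⟩ := h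
    simp only [pvBNorm]
    split_ifs with hsp hc
    · apply ih
      refine ⟨?_, ?_, ?_⟩
      · intro x hx _
        rcases List.mem_append.mp hx with hx | hx
        · exact h1 x hx (by assumption)
        · simpa using hx
      · rcases hc with ⟨hne, _⟩
        rcases List.exists_cons_of_ne_nil hne with ⟨a, t, rfl⟩
        simpa using h2
      · intro _
        simpa using hc.2
    · exact ih pieces ⟨h1, h2, h3⟩
    · apply ih
      have hx := pvLowerChar_not_space c (by simpa using hsp)
      have hxs : PySem.Chars.lowerChar c ≠ ' ' := pvLower_ne_space c (by simpa using hsp)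
      refine ⟨?_, ?_, ?_⟩
      · intro x hmem hsp2
        rcases List.mem_append.mp hmem with hm | hm
        · exact h1 x hm hsp2
        · simp at hm; rw [hm] at hsp2; rw [hm]; exact absurd hsp2 (by simp [hx])
      · cases pieces with
        | nil => simpa using hxs
        | cons a t => simpa using h2
      · intro hl
        simp at hl
        exact absurd hl hxs

-- On a pvGood list, Python strip() is exactly "drop one trailing space if present".
theorem pvStrip_good (cs : List Char) (h : pvGood cs) :
    PySem.Chars.strip cs = if PySem.Chars.endswith cs [' '] then cs.dropLast else cs := by
  obtain ⟨h1, h2, h3⟩ := h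
  have hl : PySem.Chars.lstrip cs = cs := by
    cases cs with
    | nil => rfl
    | cons a t =>
      have ha : PySem.Chars.isspace a = false := by
        by_contra hx
        have := h1 a (by simp) (by simpa using hx)
        subst this
        simp at h2
      simp [PySem.Chars.lstrip, ha]
  rw [PySem.Chars.strip, hl]
  rcases List.eq_nil_or_concat cs with rfl | ⟨ys, y, rfl⟩
  · rfl
  · rw [List.concat_eq_append] at *
    by_cases hy : y = ' '
    · subst hy
      have hes : PySem.Chars.endswith (ys ++ [' ']) [' '] = true :=
        (PySem.Chars.endswith_iff _ _).mpr ⟨ys, rfl⟩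
      rw [hes, if_pos rfl]
      have hys : List.dropWhile PySem.Chars.isspace ys.reverse = ys.reverse := by
        rcases List.eq_nil_or_concat ys with rfl | ⟨zs, z, rfl⟩
        · rfl
        · rw [List.concat_eq_append] at *
          have hz : z ≠ ' ' := by
            have := h3 (by simp)
            simpa using this
          have hzs : PySem.Chars.isspace z = false := by
            by_contra hx
            exact hz (h1 z (by simp) (by simpa using hx))
          simp [hzs]
      have hr : PySem.Chars.rstrip (ys ++ [' ']) = ys := by
        simp [PySem.Chars.rstrip, PySem.Chars.isspace, hys]
      rw [hr]
      simp
    · have hsp : PySem.Chars.isspace y = false := by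
        by_contra hx
        exact hy (h1 y (by simp) (by simpa using hx))
      have hes : PySem.Chars.endswith (ys ++ [y]) [' '] = false := by
        rw [Bool.eq_false_iff]
        intro hx
        obtain ⟨pre, hpre⟩ := (PySem.Chars.endswith_iff _ _).mp hx
        have := congrArg List.getLast? hpre
        simp at this
        exact hy this.symm
      rw [hes]
      simp [PySem.Chars.rstrip, hsp]

-- The recovery pass computes index_map[pos] (none exactly when pos is past the end).
theorem pvBRecover_eq (l : List Char) (idx : Int) (chars : List Char) (imap : List Int) (pos : Int)
    (hlen : imap.length = chars.length) (hpos : (chars.length : Int) ≤ pos) :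
    pvBRecover l idx pos (chars.length : Int) (chars.getLast? == some ' ')
      = PySem.List.pyGet? (pvALoop l idx chars imap).2 pos := by
  induction l generalizing idx chars imap with
  | nil =>
    simp only [pvBRecover, pvALoop]
    have h0 : 0 ≤ pos := le_trans (Int.natCast_nonneg _) hpos
    obtain ⟨n, rfl⟩ := Int.eq_ofNat_of_zero_le h0
    rw [PySem.List.pyGet?_natCast]
    rw [List.getElem?_eq_none (by omega)]
  | cons c rest ih =>
    simp only [pvBRecover, pvALoop]
    by_cases hsp : PySem.Chars.isspace c = true
    · rw [if_pos hsp, if_pos hsp]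
      have hcond : (0 < (chars.length : Int) ∧ (chars.getLast? == some ' ') = false)
          ↔ (chars ≠ [] ∧ chars.getLast? ≠ some ' ') := by
        constructor
        · rintro ⟨ha, hb⟩
          refine ⟨by intro hn; subst hn; simp at ha, by simpa using hb⟩
        · rintro ⟨ha, hb⟩
          refine ⟨by cases chars with | nil => exact absurd rfl ha | cons a t => simp, by simpa using hb⟩
      by_cases hc : chars ≠ [] ∧ chars.getLast? ≠ some ' '
      · rw [if_pos (hcond.mpr hc), if_pos hc]
        by_cases he : (chars.length : Int) = pos
        · rw [if_pos he]
          obtain ⟨t, ht⟩ := pvALoop_snd_prefix rest (idx + 1) (chars ++ [' ']) (imap ++ [idx])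
          rw [ht, ← he, ← hlen]
          rw [show imap ++ [idx] ++ t = imap ++ ([idx] ++ t) by simp]
          rw [PySem.List.pyGet?_natCast]
          simp
        · rw [if_neg he]
          have := ih (idx + 1) (chars ++ [' ']) (imap ++ [idx]) (by simp [hlen]) (by simp; omega)
          simpa using this
      · rw [if_neg (by rw [hcond]; exact hc), if_neg hc]
        exact ih (idx + 1) chars imap hlen hpos
    · rw [if_neg hsp, if_neg hsp]
      by_cases he : (chars.length : Int) = pos
      · rw [if_pos he]
        obtain ⟨t, ht⟩ := pvALoop_snd_prefix rest (idx + 1) (chars ++ [PySem.Chars.lowerChar c]) (imap ++ [idx])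
        rw [ht, ← he, ← hlen]
        rw [show imap ++ [idx] ++ t = imap ++ ([idx] ++ t) by simp]
        rw [PySem.List.pyGet?_natCast]
        simp
      · rw [if_neg he]
        have hx : ((chars ++ [PySem.Chars.lowerChar c]).getLast? == some ' ') = false := by
          simp [pvLower_ne_space c (by simpa using hsp)]
        have := ih (idx + 1) (chars ++ [PySem.Chars.lowerChar c]) (imap ++ [idx]) (by simp [hlen]) (by simp; omega)
        rw [hx] at this
        simpa using this

-- pyGet? on an out-of-range non-negative index is none.
theorem pvPyGet?_none (imap : List Int) (pos : Int) (h : (imap.length : Int) ≤ pos) :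
    PySem.List.pyGet? imap pos = none := by
  have h0 : 0 ≤ pos := le_trans (Int.natCast_nonneg _) h
  obtain ⟨n, rfl⟩ := Int.eq_ofNat_of_zero_le h0
  rw [PySem.List.pyGet?_natCast]
  rw [List.getElem?_eq_none (by omega)]

-- ===== VERDICT (by name: the statement is the Claim_ definition above) =====
theorem find_normalized_substring_start_py_spec : Claim_equal_find_normalized_substring_start_py := by
  intro text sub _
  unfold Spec_find_normalized_substring_start_py
  unfold find_normalized_substring_start_py find_normalized_substring_start_py_alt
  by_cases hs : sub = ""
  · simp [hs]
  · simp only [hs, if_false]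
    have hfst : (pvALoop text.toList 0 [] []).1 = pvBNorm text.toList [] :=
      pvALoop_fst text.toList 0 [] []
    have hgood : pvGood (pvBNorm text.toList []) :=
      pvGood_bNorm text.toList [] ⟨by simp, by simp, by simp⟩
    have hnorm : PySem.Chars.strip (pvALoop text.toList 0 [] []).1
        = (if PySem.Chars.endswith (pvBNorm text.toList []) [' ']
           then PySem.Chars.slice (pvBNorm text.toList []) none (some (-1))
           else pvBNorm text.toList []) := by
      rw [hfst, pvStrip_good _ hgood]
      rw [PySem.Chars.slice_eq_listSlice, PySem.List.slice_to_neg_one]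
    rw [hnorm]
    by_cases hneg : PySem.Chars.find
        (if PySem.Chars.endswith (pvBNorm text.toList []) [' ']
         then PySem.Chars.slice (pvBNorm text.toList []) none (some (-1))
         else pvBNorm text.toList []) sub.toList < 0
    · rw [if_pos (Or.inl hneg), if_pos hneg]
    · rw [if_neg hneg]
      have hrec := pvBRecover_eq text.toList 0 [] []
        (PySem.Chars.find
          (if PySem.Chars.endswith (pvBNorm text.toList []) [' ']
           then PySem.Chars.slice (pvBNorm text.toList []) none (some (-1))
           else pvBNorm text.toList []) sub.toList)
        rfl (by simpa using le_of_not_gt hneg)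
      simp only [List.length_nil, Nat.cast_zero, List.getLast?_nil,
        show ((none : Option Char) == some ' ') = false from rfl] at hrec
      rw [← hrec]
      by_cases hge : ((pvALoop text.toList 0 [] []).2.length : Int)
          ≤ PySem.Chars.find
            (if PySem.Chars.endswith (pvBNorm text.toList []) [' ']
             then PySem.Chars.slice (pvBNorm text.toList []) none (some (-1))
             else pvBNorm text.toList []) sub.toList
      · rw [if_pos (Or.inr hge)]
        rw [hrec, pvPyGet?_none _ _ hge]
      · rw [if_neg (by simp only [not_or]; exact ⟨hneg, hge⟩)]
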